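-- pv_equiv track=rewrite | github.com/prawl/FFTCustomColors | scripts/hair_fix/framedetect.py | bands
-- ===== SOURCE A (Python) =====
-- TOL = 3  # a row with this many or fewer non-zero px counts as a gap
--
-- def bands(g, h):
--     counts = [sum(1 for v in g[y] if v != 0) for y in range(h)]
--     is_content = [c > TOL for c in counts]
--     out = []
--     y = 0
--     while y < h:
--         if is_content[y]:
--             s = y
--             while y < h and is_content[y]:
--                 y += 1
--             out.append((s, y - 1))
--         else:
--             y += 1
--     return out
-- ===== SOURCE B (Python) =====
-- TOL = 3  # a row with this many or fewer non-zero px counts as a gap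
--
-- def bands(g, h):
--     # Boundary-list decomposition: no run state at all.  Collect every band
--     # start row (content row whose predecessor is not content) and every band
--     # end row (content row whose successor is not content) in two independent
--     # comprehensions, then pair them positionally with zip.
--     ic = [sum(1 for v in g[y] if v != 0) > TOL for y in range(h)]
--     starts = [y for y in range(h) if ic[y] and (y == 0 or not ic[y - 1])]
--     ends = [y for y in range(h) if ic[y] and (y == h - 1 or not ic[y + 1])]
--     return list(zip(starts, ends))
-- ===== Notes on version B (the rewrite author's own statement) =====
-- stated objective: alternative
-- what changed: Replaces A's run-consuming nested while-loops with two independent boundary comprehensions (a row is a band start if it is content and its predecessor is not; a band end if it is content and its successor is not) paired up positionally with zip.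
import Mathlib
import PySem

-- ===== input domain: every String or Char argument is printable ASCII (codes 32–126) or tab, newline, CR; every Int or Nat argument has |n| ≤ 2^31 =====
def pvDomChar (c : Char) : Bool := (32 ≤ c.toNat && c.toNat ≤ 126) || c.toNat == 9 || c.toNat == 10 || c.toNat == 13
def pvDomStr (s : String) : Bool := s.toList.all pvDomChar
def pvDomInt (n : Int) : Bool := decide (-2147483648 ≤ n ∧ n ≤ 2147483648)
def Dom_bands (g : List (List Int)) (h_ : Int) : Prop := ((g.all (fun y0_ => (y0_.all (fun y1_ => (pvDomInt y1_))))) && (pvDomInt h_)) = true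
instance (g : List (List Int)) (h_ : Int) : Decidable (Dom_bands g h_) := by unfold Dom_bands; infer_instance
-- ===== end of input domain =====

-- B replaces A's run-consuming nested while-loops by two independent boundary
-- comprehensions (band start rows / band end rows) paired with zip (objective: alternative).

-- ===== PORT A =====
-- counts = [sum(1 for v in g[y] if v != 0) for y in range(h)]
def pvCountsA (g : List (List Int)) (h_ : Int) : List Int :=
  (PySem.List.pyRange 0 h_ 1).map
    (fun y => ((((PySem.List.pyGet? g y).getD []).filter (fun v => v ≠ 0)).length : Int))

-- is_content = [c > TOL for c in counts]
def pvIsContentA (counts : List Int) : List Bool :=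
  counts.map (fun c => decide (c > 3))

-- inner 'while y < h and is_content[y]: y += 1' — returns the final y.
-- The Nat argument is fuel making the recursion structural; called with fuel
-- ≥ (h - y).toNat it performs exactly the Python loop's iterations.
def pvInnerA (ic : List Bool) (h_ : Int) : Nat → Int → Int
  | 0, y => y
  | f + 1, y =>
    if y < h_ ∧ ic.getD y.toNat false = true then pvInnerA ic h_ f (y + 1) else y

-- outer 'while y < h: …' with the run-consuming branch (same fuel convention)
def pvOuterA (ic : List Bool) (h_ : Int) : Nat → Int → List (Int × Int) → List (Int × Int)
  | 0, _, out => out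
  | f + 1, y, out =>
    if y < h_ then
      if ic.getD y.toNat false = true then
        pvOuterA ic h_ f (pvInnerA ic h_ (f + 1) y) (out ++ [(y, pvInnerA ic h_ (f + 1) y - 1)])
      else pvOuterA ic h_ f (y + 1) out
    else out

def bands (g : List (List Int)) (h_ : Int) : List (Int × Int) :=
  pvOuterA (pvIsContentA (pvCountsA g h_)) h_ h_.toNat 0 []

-- ===== PORT B =====
-- ic = [sum(1 for v in g[y] if v != 0) > TOL for y in range(h)]
def pvContentB (g : List (List Int)) (h_ : Int) : List Bool :=
  (PySem.List.pyRange 0 h_ 1).map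
    (fun y => decide (((((PySem.List.pyGet? g y).getD []).filter (fun v => v ≠ 0)).length : Int) > 3))

-- ic[y] and (y == 0 or not ic[y - 1])
def pvIsStart (ic : List Bool) (y : Int) : Bool :=
  ic.getD y.toNat false && (y == 0 || !(ic.getD (y - 1).toNat false))

-- ic[y] and (y == h - 1 or not ic[y + 1])
def pvIsEnd (ic : List Bool) (h_ y : Int) : Bool :=
  ic.getD y.toNat false && (y == h_ - 1 || !(ic.getD (y + 1).toNat false))

-- starts/ends comprehensions over range(h), then list(zip(starts, ends))
def bands_alt (g : List (List Int)) (h_ : Int) : List (Int × Int) :=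
  ((PySem.List.pyRange 0 h_ 1).filter (pvIsStart (pvContentB g h_))).zip
    ((PySem.List.pyRange 0 h_ 1).filter (pvIsEnd (pvContentB g h_) h_))

-- ===== PRECONDITION & SPEC =====
-- A raises IndexError (g[y]) exactly when h exceeds the number of rows; excluded.
def Pre_bands (g : List (List Int)) (h_ : Int) : Prop := 0 ≤ (g.length : Int) - h_
instance (g : List (List Int)) (h_ : Int) : Decidable (Pre_bands g h_) := by
  unfold Pre_bands; infer_instance

def pvWitness_bands : List (List Int) × Int := ([[1, 2, 3, 4, 5], [0, 0, 0, 0, 0], [7, 7, 7, 7, 7]], 3)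

def Spec_bands (g : List (List Int)) (h_ : Int) (out : List (Int × Int)) : Prop := out = bands_alt g h_
instance (g : List (List Int)) (h_ : Int) (out : List (Int × Int)) : Decidable (Spec_bands g h_ out) := by unfold Spec_bands; infer_instance

-- ===== CLAIM (what is proved, stated in full; the proofs are below) =====
def Claim_equal_bands : Prop := ∀ (g : List (List Int)) (h_ : Int), Dom_bands g h_ → Pre_bands g h_ → Spec_bands g h_ (bands g h_)

-- ===== LEMMAS AND PROOFS =====

-- the two content lists coincide
theorem pvContent_eq (g : List (List Int)) (h_ : Int) :
    pvIsContentA (pvCountsA g h_) = pvContentB g h_ := by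
  simp [pvIsContentA, pvCountsA, pvContentB, List.map_map, Function.comp]

theorem pvContent_len (g : List (List Int)) (h_ : Int) :
    (pvContentB g h_).length = h_.toNat := by
  simp [pvContentB, PySem.List.length_pyRange_one]

-- proof-only generalisations of B's two comprehensions, starting at row y
def sF (ic : List Bool) (h_ y : Int) : List Int :=
  (PySem.List.pyRange y h_ 1).filter (pvIsStart ic)
def eF (ic : List Bool) (h_ y : Int) : List Int :=
  (PySem.List.pyRange y h_ 1).filter (pvIsEnd ic h_)

theorem pvInnerA_ge (ic : List Bool) (h_ : Int) :
    ∀ (f : ℕ) (y : Int), y ≤ pvInnerA ic h_ f y := by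
  intro f
  induction f with
  | zero => intro y; simp [pvInnerA]
  | succ f ih =>
    intro y
    simp only [pvInnerA]
    split
    · have := ih (y + 1); omega
    · omega

-- full characterisation of the inner loop's stopping point
theorem pvInnerA_spec (ic : List Bool) (h_ : Int) :
    ∀ (f : ℕ) (y : Int), (h_ - y).toNat ≤ f → y ≤ h_ →
      pvInnerA ic h_ f y ≤ h_ ∧
      (∀ z, y ≤ z → z < pvInnerA ic h_ f y → ic.getD z.toNat false = true) ∧
      (pvInnerA ic h_ f y = h_ ∨ ic.getD (pvInnerA ic h_ f y).toNat false = false) := by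
  intro f
  induction f with
  | zero =>
    intro y hf hy
    have hyh : y = h_ := by omega
    subst hyh
    refine ⟨by simp [pvInnerA], ?_, by simp [pvInnerA]⟩
    intro z h1 h2
    simp only [pvInnerA] at h2
    exact absurd h2 (by omega)
  | succ f ih =>
    intro y hf hy
    simp only [pvInnerA]
    by_cases hc : y < h_ ∧ ic.getD y.toNat false = true
    · rw [if_pos hc]
      obtain ⟨h1, h2, h3⟩ := ih (y + 1) (by omega) (by omega)
      refine ⟨h1, ?_, h3⟩
      intro z hz1 hz2
      rcases eq_or_lt_of_le hz1 with rfl | hlt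
      · exact hc.2
      · exact h2 z (by omega) hz2
    · rw [if_neg hc]
      refine ⟨hy, fun z hz1 hz2 => absurd hz2 (by omega), ?_⟩
      rcases eq_or_lt_of_le hy with rfl | hlt
      · exact Or.inl rfl
      · right
        by_cases hb : ic.getD y.toNat false = true
        · exact absurd ⟨hlt, hb⟩ hc
        · simpa using hb

-- rows strictly inside a content run are not band starts: skipping them
theorem sF_skip (ic : List Bool) (h_ : Int) :
    ∀ (n : ℕ) (w e : Int), e = w + n → 1 ≤ w → e ≤ h_ →
      (∀ z, w - 1 ≤ z → z < e → ic.getD z.toNat false = true) →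
      sF ic h_ w = sF ic h_ e := by
  intro n
  induction n with
  | zero => intro w e he _ _ _; rw [show w = e by omega]
  | succ n ih =>
    intro w e he hw hh hrun
    have hwe : w < e := by omega
    have hstep : sF ic h_ w = sF ic h_ (w + 1) := by
      unfold sF
      rw [PySem.List.pyRange_one_cons (by omega)]
      rw [List.filter_cons]
      have hs : pvIsStart ic w = false := by
        unfold pvIsStart
        have h1 : ic.getD (w - 1).toNat false = true := hrun (w - 1) (by omega) (by omega)
        have h0 : (w == (0 : Int)) = false := beq_eq_false_iff_ne.mpr (by omega)
        rw [h0, h1]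
        simp
      simp [hs]
    rw [hstep]
    exact ih (w + 1) e (by omega) (by omega) hh (fun z hz1 hz2 => hrun z (by omega) hz2)

-- a content run [w, e) contributes exactly the end row e-1 to the ends list
theorem eF_run (ic : List Bool) (h_ : Int) :
    ∀ (n : ℕ) (w e : Int), e = w + n → w < e → e ≤ h_ →
      (∀ z, w ≤ z → z < e → ic.getD z.toNat false = true) →
      (e = h_ ∨ ic.getD e.toNat false = false) →
      eF ic h_ w = (e - 1) :: eF ic h_ e := by
  intro n
  induction n with
  | zero => intro w e he hwe _ _ _; omega
  | succ n ih =>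
    intro w e he hwe hh hrun hend
    have hwh : w < h_ := by omega
    unfold eF
    rw [PySem.List.pyRange_one_cons (by omega), List.filter_cons]
    by_cases hlast : w + 1 = e
    · have hw1 : ic.getD w.toNat false = true := hrun w (le_refl w) hwe
      have hs : pvIsEnd ic h_ w = true := by
        unfold pvIsEnd
        rw [hw1]
        rcases hend with hC | hC
        · have hb : (w == h_ - 1) = true := beq_iff_eq.mpr (by omega)
          rw [hb]
          simp
        · have hn : ic.getD (w + 1).toNat false = false := by rw [hlast]; exact hC
          rw [hn]
          simp
      rw [hs]
      simp only [if_true]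
      rw [hlast]
      congr 1
      omega
    · have hn : ic.getD (w + 1).toNat false = true := hrun (w + 1) (by omega) (by omega)
      have hne : (w == h_ - 1) = false := beq_eq_false_iff_ne.mpr (by omega)
      have hs : pvIsEnd ic h_ w = false := by
        unfold pvIsEnd
        rw [hne, hn]
        simp
      rw [hs]
      simp only [Bool.false_eq_true, if_false]
      have hrest := ih (w + 1) e (by omega) (by omega) hh
        (fun z hz1 hz2 => hrun z (by omega) hz2) hend
      unfold eF at hrest
      exact hrest

-- main invariant: A's outer loop from row y produces the zipped boundary lists from y
theorem pvMain (ic : List Bool) (h_ : Int) (hlen : ic.length = h_.toNat) :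
    ∀ (f : ℕ) (y : Int), (h_ - y).toNat ≤ f → 0 ≤ y →
      (y = 0 ∨ ic.getD (y - 1).toNat false = false ∨ ic.getD y.toNat false = false) →
      ∀ out, pvOuterA ic h_ f y out = out ++ (sF ic h_ y).zip (eF ic h_ y) := by
  intro f
  induction f with
  | zero =>
    intro y hf hy _ out
    have : h_ ≤ y := by omega
    simp [pvOuterA, sF, eF, PySem.List.pyRange_one_eq_nil this]
  | succ f ih =>
    intro y hf hy hinv out
    by_cases hlt : y < h_
    · simp only [pvOuterA]
      rw [if_pos hlt]
      by_cases hc : ic.getD y.toNat false = true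
      · rw [if_pos hc]
        set e := pvInnerA ic h_ (f + 1) y with hedef
        obtain ⟨he_h, herun, heend⟩ := pvInnerA_spec ic h_ (f + 1) y (by omega) (by omega)
        have hye : y + 1 ≤ e := by
          have h1 : e = pvInnerA ic h_ f (y + 1) := by
            rw [hedef]; simp only [pvInnerA]; rw [if_pos ⟨hlt, hc⟩]
          have := pvInnerA_ge ic h_ f (y + 1)
          omega
        -- icv e = false in every case (out of range when e = h_)
        have hice : ic.getD e.toNat false = false := by
          rcases heend with hC | hC
          · apply List.getD_eq_default
            omega
          · exact hC
        -- y is a band start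
        have hstart : pvIsStart ic y = true := by
          unfold pvIsStart
          rw [hc]
          rcases hinv with h0 | h0 | h0
          · subst h0; simp
          · rw [h0]; simp
          · rw [hc] at h0; cases h0
        have hsf : sF ic h_ y = y :: sF ic h_ e := by
          unfold sF
          rw [PySem.List.pyRange_one_cons hlt, List.filter_cons, hstart]
          simp only [if_true]
          congr 1
          exact sF_skip ic h_ (e - (y + 1)).toNat (y + 1) e (by omega) (by omega) he_h
            (fun z hz1 hz2 => herun z (by omega) hz2)
        have hef : eF ic h_ y = (e - 1) :: eF ic h_ e := by
          exact eF_run ic h_ (e - y).toNat y e (by omega) (by omega) he_h herun heend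
        rw [ih e (by omega) (by omega) (Or.inr (Or.inr hice)) (out ++ [(y, e - 1)])]
        rw [hsf, hef]
        simp [List.zip]
      · rw [if_neg hc]
        have hcf : ic.getD y.toNat false = false := by
          cases h : ic.getD y.toNat false
          · rfl
          · exact absurd h hc
        have hsf : sF ic h_ y = sF ic h_ (y + 1) := by
          unfold sF
          rw [PySem.List.pyRange_one_cons hlt, List.filter_cons]
          have hps : pvIsStart ic y = false := by unfold pvIsStart; rw [hcf]; simp
          simp [hps]
        have hef : eF ic h_ y = eF ic h_ (y + 1) := by
          unfold eF
          rw [PySem.List.pyRange_one_cons hlt, List.filter_cons]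
          have hpe : pvIsEnd ic h_ y = false := by unfold pvIsEnd; rw [hcf]; simp
          simp [hpe]
        have hcf' : ic.getD (y + 1 - 1).toNat false = false := by
          rw [show y + 1 - 1 = y by omega]; exact hcf
        rw [ih (y + 1) (by omega) (by omega) (Or.inr (Or.inl hcf')) out, hsf, hef]
    · simp only [pvOuterA]
      rw [if_neg hlt]
      simp [sF, eF, PySem.List.pyRange_one_eq_nil (by omega : h_ ≤ y)]

-- ===== VERDICT (by name: the statement is the Claim_ definition above) =====
theorem bands_spec : Claim_equal_bands := by
  intro g h_ _ _
  unfold Spec_bands bands bands_alt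
  rw [pvContent_eq]
  rw [pvMain (pvContentB g h_) h_ (pvContent_len g h_) h_.toNat 0 (by omega) le_rfl
    (Or.inl rfl) []]
  simp [sF, eF]
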